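-- pv_equiv track=rewrite | github.com/pc5401/my_BOJ | 백준/Silver/6615. 콜라츠 추측/콜라츠 추측.py | solve
-- ===== SOURCE A (Python) =====
-- def solve(A: int, B: int) -> tuple[int,int,int]:
--     stepsA = {}
--     x = A
--     step = 0
--     while True:
--         if x not in stepsA:
--             stepsA[x] = step
--         if x == 1:
--             break
--         if x % 2 == 0:
--             x //= 2
--         else:
--             x = 3*x + 1
--         step += 1
--     # B 경로 따라가며 만나는 값 찾기
--     y = B
--     stepB = 0
--     while True:
--         if y in stepsA:
--             return stepsA[y], stepB, y
--         if y == 1: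
--             # 1은 A 경로에도 있으니 여기서도 만남
--             return stepsA[1], stepB, 1
--         if y % 2 == 0:
--             y //= 2
--         else:
--             y = 3*y + 1
--         stepB += 1
-- ===== SOURCE B (Python) =====
-- def solve(A: int, B: int) -> tuple[int, int, int]:
--     # Build the full Collatz path of a value as a list ending at 1.
--     def tail(n):
--         p = [n]
--         while p[-1] != 1:
--             m = p[-1]
--             p.append(m // 2 if m % 2 == 0 else 3 * m + 1)
--         return p
--
--     pa = tail(A)
--     seen = set(pa)
--     y, stepB = B, 0
--     while y not in seen:
--         y = y // 2 if y % 2 == 0 else 3 * y + 1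
--         stepB += 1
--     # A's path and the path of y share their whole tail, so y's position in pa
--     # is len(pa) minus the length of y's own path.
--     return len(pa) - len(tail(y)), stepB, y
-- ===== Notes on version B (the rewrite author's own statement) =====
-- stated objective: alternative
-- what changed: B drops A's value-to-step dictionary entirely: it builds A's Collatz path as a plain list, streams B's orbit against a set of that path, and recovers A's step index from the shared-tail identity stepsA = len(path(A)) - len(path(y)) by rebuilding y's path, instead of looking the index up in a hash map built during the first walk.
import Mathlib
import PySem

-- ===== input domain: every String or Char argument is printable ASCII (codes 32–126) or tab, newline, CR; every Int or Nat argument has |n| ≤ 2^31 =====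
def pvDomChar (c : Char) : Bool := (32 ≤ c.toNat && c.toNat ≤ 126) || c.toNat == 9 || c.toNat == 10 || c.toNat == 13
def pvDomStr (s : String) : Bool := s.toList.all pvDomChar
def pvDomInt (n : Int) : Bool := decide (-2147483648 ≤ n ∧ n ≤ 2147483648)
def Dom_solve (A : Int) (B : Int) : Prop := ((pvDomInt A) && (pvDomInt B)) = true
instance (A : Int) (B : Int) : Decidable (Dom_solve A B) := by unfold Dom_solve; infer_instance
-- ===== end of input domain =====

-- B replaces A's value→step dictionary by the plain path list, a membership set and the
-- shared-tail identity stepsA = len(path(A)) - len(path(y)); same asymptotic cost (objective: alternative).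
-- Both Python programs loop forever when A ≤ 0 or B ≤ 0; the ports totalise those loops with
-- fuel (pvFuel) and both return (0,0,0) when it runs out (the equivalence is proved for all inputs).

-- ===== PORT A =====
def pvNext (x : Int) : Int :=
  if PySem.Int.mod x 2 = 0 then PySem.Int.floordiv x 2 else 3 * x + 1

def solveLoopA : Nat → PySem.Dict Int Int → Int → Int → Option (PySem.Dict Int Int)
  | 0, _, _, _ => none
  | f+1, d, x, step =>
    let d' := if (d.get? x).isSome then d else d.insert x step
    if x = 1 then some d'
    else solveLoopA f d' (pvNext x) (step + 1)

-- Python's 'return stepsA[1]' would raise KeyError were key 1 absent; when called from solve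
-- the first loop always inserted key 1, so the branch is unreachable there ('some' fires
-- first) and 'getD … 0' is exact.
def solveLoopB : Nat → PySem.Dict Int Int → Int → Int → Option (Int × Int × Int)
  | 0, _, _, _ => none
  | f+1, d, y, stepB =>
    match d.get? y with
    | some s => some (s, stepB, y)
    | none =>
      if y = 1 then some (d.getD 1 0, stepB, 1)
      else solveLoopB f d (pvNext y) (stepB + 1)

def pvFuel : Nat := 2 ^ 64

def solve (A : Int) (B : Int) : Int × Int × Int :=
  match solveLoopA pvFuel PySem.Dict.empty A 0 with
  | none => (0, 0, 0)
  | some d => (solveLoopB pvFuel d B 0).getD (0, 0, 0)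

-- ===== PORT B =====
def pvTailLoop : Nat → List Int → Option (List Int)
  | 0, _ => none
  | f+1, p =>
    match p.getLast? with
    | none => none   -- unreachable: the list starts nonempty and only grows
    | some m => if m = 1 then some p else pvTailLoop f (p ++ [pvNext m])

def pvTail (f : Nat) (n : Int) : Option (List Int) := pvTailLoop f [n]

def pvMeetLoop : Nat → PySem.Set Int → Int → Int → Option (Int × Int)
  | 0, _, _, _ => none
  | f+1, s, y, stepB =>
    if PySem.Set.contains s y then some (y, stepB)
    else pvMeetLoop f s (pvNext y) (stepB + 1)

def solve_alt (A : Int) (B : Int) : Int × Int × Int :=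
  match pvTail pvFuel A with
  | none => (0, 0, 0)
  | some pa =>
    match pvMeetLoop pvFuel (PySem.Set.ofList pa) B 0 with
    | none => (0, 0, 0)
    | some (y, stepB) =>
      match pvTail pvFuel y with
      | none => (0, 0, 0)
      | some py => ((pa.length : Int) - (py.length : Int), stepB, y)

-- ===== PRECONDITION & SPEC =====
def Spec_solve (A : Int) (B : Int) (out : Int × Int × Int) : Prop := out = solve_alt A B
instance (A : Int) (B : Int) (out : Int × Int × Int) : Decidable (Spec_solve A B out) := by unfold Spec_solve; infer_instance

-- ===== CLAIM (what is proved, stated in full; the proofs are below) =====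
def Claim_equal_solve : Prop := ∀ (A : Int) (B : Int), Dom_solve A B → Spec_solve A B (solve A B)

-- ===== LEMMAS AND PROOFS =====

-- k-fold Collatz step
def pvIter : Nat → Int → Int
  | 0, x => x
  | k+1, x => pvIter k (pvNext x)

-- the orbit of x reaches 1 for the first time after exactly t steps
def pvGood (x : Int) (t : Nat) : Prop := pvIter t x = 1 ∧ ∀ k < t, pvIter k x ≠ 1

lemma pvIter_add (a b : Nat) (x : Int) : pvIter (a + b) x = pvIter b (pvIter a x) := by
  induction a generalizing x with
  | zero => rw [Nat.zero_add]; rfl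
  | succ a ih => rw [Nat.succ_add]; show pvIter (a + b) (pvNext x) = _; rw [ih]; rfl

lemma pvTailLoop_some : ∀ (t f : Nat) (x : Int) (p : List Int), pvGood x t → t < f →
    p.getLast? = some x →
    pvTailLoop f p = some (p ++ (List.range t).map (fun k => pvIter (k+1) x)) := by
  intro t
  induction t with
  | zero =>
    intro f x p hg hf hl
    obtain ⟨f, rfl⟩ : ∃ f', f = f' + 1 := ⟨f - 1, by omega⟩
    have hx : x = 1 := hg.1
    simp [pvTailLoop, hl, hx]
  | succ t ih =>
    intro f x p hg hf hl
    obtain ⟨f, rfl⟩ : ∃ f', f = f' + 1 := ⟨f - 1, by omega⟩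
    have hx : x ≠ 1 := hg.2 0 (by omega)
    have hg' : pvGood (pvNext x) t := by
      constructor
      · exact hg.1
      · intro k hk
        exact hg.2 (k+1) (by omega)
    have := ih f (pvNext x) (p ++ [pvNext x]) hg' (by omega) (by simp)
    simp only [pvTailLoop, hl, if_neg hx, this]
    simp only [List.range_succ_eq_map, List.map_cons, List.map_map, List.append_assoc, List.singleton_append]
    rfl

lemma pvTailLoop_eq_some : ∀ (f : Nat) (p p' : List Int) (x : Int), p.getLast? = some x →
    pvTailLoop f p = some p' →
    ∃ t, t < f ∧ pvGood x t ∧ p' = p ++ (List.range t).map (fun k => pvIter (k+1) x) := by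
  intro f
  induction f with
  | zero => intro p p' x _ h; simp [pvTailLoop] at h
  | succ f ih =>
    intro p p' x hl h
    simp only [pvTailLoop, hl] at h
    by_cases hx : x = 1
    · rw [if_pos hx] at h
      refine ⟨0, by omega, ⟨by simpa [pvIter] using hx, by omega⟩, ?_⟩
      simpa using h.symm
    · rw [if_neg hx] at h
      obtain ⟨t, htf, hg, hp⟩ := ih (p ++ [pvNext x]) p' (pvNext x) (by simp) h
      refine ⟨t + 1, by omega, ⟨hg.1, ?_⟩, ?_⟩
      · intro k hk
        match k with
        | 0 => exact hx
        | j+1 => exact hg.2 j (by omega)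
      · rw [hp]
        simp only [List.range_succ_eq_map, List.map_cons, List.map_map, List.append_assoc, List.singleton_append]
        rfl

lemma pvDictStep (l : List Int) (x : Int) (d : PySem.Dict Int Int)
    (hd : ∀ y, d.get? y = (PySem.List.index? l y).map (fun n : Nat => (n : Int))) (y : Int) :
    (if (d.get? x).isSome then d else d.insert x (l.length : Int)).get? y
      = (PySem.List.index? (l ++ [x]) y).map (fun n : Nat => (n : Int)) := by
  by_cases hx : x ∈ l
  · have hsome : (d.get? x).isSome := by
      rw [hd x]
      rcases h : PySem.List.index? l x with _ | i
      · exact absurd ((PySem.List.index?_eq_none_iff l x).1 h) (by simpa using hx)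
      · rfl
    rw [if_pos hsome]
    by_cases hy : y ∈ l
    · rw [PySem.List.index?_append_of_mem _ hy, hd]
    · have hyx : y ≠ x := fun h => hy (h ▸ hx)
      rw [hd y, (PySem.List.index?_eq_none_iff l y).2 hy,
          (PySem.List.index?_eq_none_iff (l ++ [x]) y).2 (by simp [hy, hyx])]
  · have hnone : d.get? x = none := by
      rw [hd x, (PySem.List.index?_eq_none_iff l x).2 hx]; rfl
    rw [if_neg (by simp [hnone])]
    by_cases hyx : y = x
    · subst hyx
      rw [PySem.Dict.get?_insert_self, PySem.List.index?_append_singleton_self l y hx]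
      rfl
    · rw [PySem.Dict.get?_insert_of_ne _ _ hyx]
      by_cases hy : y ∈ l
      · rw [PySem.List.index?_append_of_mem _ hy, hd]
      · rw [hd y, (PySem.List.index?_eq_none_iff l y).2 hy,
            (PySem.List.index?_eq_none_iff (l ++ [x]) y).2 (by simp [hy, hyx])]

lemma pvLoopA_pair : ∀ (f : Nat) (p : List Int) (x : Int) (d : PySem.Dict Int Int),
    p.getLast? = some x →
    (∀ y, d.get? y = (PySem.List.index? p.dropLast y).map (fun n : Nat => (n : Int))) →
    (solveLoopA f d x ((p.length : Int) - 1) = none ∧ pvTailLoop f p = none) ∨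
    (∃ d' p', solveLoopA f d x ((p.length : Int) - 1) = some d' ∧ pvTailLoop f p = some p' ∧
       ∀ y, d'.get? y = (PySem.List.index? p' y).map (fun n : Nat => (n : Int))) := by
  intro f
  induction f with
  | zero => intro p x d _ _; exact Or.inl ⟨rfl, rfl⟩
  | succ f ih =>
    intro p x d hl hd
    have hpne : p ≠ [] := by rintro rfl; simp at hl
    have hdec : p.dropLast ++ [x] = p := by
      obtain ⟨ys, rfl⟩ := List.getLast?_eq_some_iff.mp hl
      simp
    have hlen : (p.dropLast.length : Int) = (p.length : Int) - 1 := by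
      have : p.length ≠ 0 := by simpa using hpne
      simp [List.length_dropLast]; omega
    have hd' : ∀ y, (if (d.get? x).isSome then d else d.insert x ((p.length : Int) - 1)).get? y
        = (PySem.List.index? p y).map (fun n : Nat => (n : Int)) := by
      intro y
      have h := pvDictStep p.dropLast x d hd y
      rw [hdec, hlen] at h
      exact h
    by_cases hx : x = 1
    · refine Or.inr ⟨_, p, ?_, ?_, hd'⟩
      · simp [solveLoopA, hx]
      · simp [pvTailLoop, hl, hx]
    · have hrecA : solveLoopA (f+1) d x ((p.length : Int) - 1)
          = solveLoopA f (if (d.get? x).isSome then d else d.insert x ((p.length : Int) - 1)) (pvNext x) (((p.length : Int) - 1) + 1) := by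
        simp [solveLoopA, hx]
      have hrecT : pvTailLoop (f+1) p = pvTailLoop f (p ++ [pvNext x]) := by
        simp [pvTailLoop, hl, hx]
      have hstep : ((p.length : Int) - 1) + 1 = (((p ++ [pvNext x]).length : Int) - 1) := by
        simp
      have hdrop : (p ++ [pvNext x]).dropLast = p := by simp
      have := ih (p ++ [pvNext x]) (pvNext x)
        (if (d.get? x).isSome then d else d.insert x ((p.length : Int) - 1))
        (by simp) (by rw [hdrop]; exact hd')
      rw [hstep] at hrecA
      rcases this with ⟨h1, h2⟩ | ⟨d2, p2, h1, h2, h3⟩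
      · exact Or.inl ⟨by rw [hrecA, h1], by rw [hrecT, h2]⟩
      · exact Or.inr ⟨d2, p2, by rw [hrecA, h1], by rw [hrecT, h2], h3⟩

lemma pvLoopB_pair : ∀ (f : Nat) (pa : List Int) (d : PySem.Dict Int Int),
    (∀ z, d.get? z = (PySem.List.index? pa z).map (fun n : Nat => (n : Int))) →
    (1 : Int) ∈ pa →
    ∀ (y stepB : Int),
    (solveLoopB f d y stepB = none ∧ pvMeetLoop f (PySem.Set.ofList pa) y stepB = none) ∨
    (∃ (i : Nat) (s yv : Int), PySem.List.index? pa yv = some i ∧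
       solveLoopB f d y stepB = some ((i : Int), s, yv) ∧
       pvMeetLoop f (PySem.Set.ofList pa) y stepB = some (yv, s)) := by
  intro f
  induction f with
  | zero => intro pa d _ _ y stepB; exact Or.inl ⟨rfl, rfl⟩
  | succ f ih =>
    intro pa d hd h1 y stepB
    rcases hg : d.get? y with _ | s
    · have hy : y ∉ pa := by
        rw [hd y] at hg
        rcases h : PySem.List.index? pa y with _ | i
        · exact (PySem.List.index?_eq_none_iff pa y).1 h
        · rw [h] at hg; simp at hg
      have hy1 : y ≠ 1 := fun h => (h ▸ hy) h1
      have hc : PySem.Set.contains (PySem.Set.ofList pa) y = false := by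
        rcases h : PySem.Set.contains (PySem.Set.ofList pa) y
        · rfl
        · exact absurd ((PySem.Set.mem_ofList pa y).1 ((PySem.Set.contains_iff _ y).1 h)) hy
      have e1 : solveLoopB (f+1) d y stepB = solveLoopB f d (pvNext y) (stepB + 1) := by
        simp [solveLoopB, hg, hy1]
      have e2 : pvMeetLoop (f+1) (PySem.Set.ofList pa) y stepB
          = pvMeetLoop f (PySem.Set.ofList pa) (pvNext y) (stepB + 1) := by
        simp only [pvMeetLoop]
        rw [hc]
        simp
      rw [e1, e2]
      exact ih pa d hd h1 (pvNext y) (stepB + 1)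
    · have hidx : ∃ i : Nat, PySem.List.index? pa y = some i ∧ (i : Int) = s := by
        have := hd y
        rw [hg] at this
        rcases h : PySem.List.index? pa y with _ | i
        · rw [h] at this; simp at this
        · rw [h] at this; simp at this; exact ⟨i, rfl, this.symm⟩
      obtain ⟨i, hi, his⟩ := hidx
      have hy : y ∈ pa := by
        have : (PySem.List.index? pa y).isSome := by rw [hi]; rfl
        exact (PySem.List.index?_isSome_iff pa y).1 this
      have hc : PySem.Set.contains (PySem.Set.ofList pa) y = true :=
        (PySem.Set.contains_iff _ y).2 ((PySem.Set.mem_ofList pa y).2 hy)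
      refine Or.inr ⟨i, stepB, y, hi, ?_, ?_⟩
      · simp [solveLoopB, hg, his]
      · simp only [pvMeetLoop]
        rw [hc]
        simp

lemma solve_eq (A B : Int) : solve A B = solve_alt A B := by
  unfold solve solve_alt pvTail
  have hpair := pvLoopA_pair pvFuel [A] A PySem.Dict.empty (by simp)
    (fun y => by simp [PySem.Dict.get?_empty, PySem.List.index?])
  have h0 : ((([A] : List Int).length : Int) - 1) = 0 := by simp
  rw [h0] at hpair
  rcases hpair with ⟨h1, h2⟩ | ⟨d, pa, h1, h2, hd⟩
  · rw [h1, h2]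
  · rw [h1, h2]
    dsimp only
    obtain ⟨t, htf, hg, hpa⟩ := pvTailLoop_eq_some pvFuel [A] pa A (by simp) h2
    subst hpa
    have hlen : (([A] ++ (List.range t).map (fun k => pvIter (k+1) A)).length) = t + 1 := by simp
    have hget : ∀ k, k < t + 1 → ∀ (h : k < ([A] ++ (List.range t).map (fun k => pvIter (k+1) A)).length), ([A] ++ (List.range t).map (fun k => pvIter (k+1) A))[k] = pvIter k A := by
      intro k hk h
      match k with
      | 0 => simp [pvIter]
      | j+1 =>
        have hj : j < t := by omega
        simp only [List.singleton_append, List.getElem_cons_succ]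
        rw [List.getElem_map, List.getElem_range]
    have h1mem : (1 : Int) ∈ [A] ++ (List.range t).map (fun k => pvIter (k+1) A) := by
      have : pvIter t A ∈ [A] ++ (List.range t).map (fun k => pvIter (k+1) A) := by
        match t with
        | 0 => simp [pvIter]
        | u+1 =>
          refine List.mem_append_right _ (List.mem_map.2 ⟨u, List.mem_range.2 (by omega), rfl⟩)
      rwa [hg.1] at this
    rcases pvLoopB_pair pvFuel ([A] ++ (List.range t).map (fun k => pvIter (k+1) A)) d hd h1mem B 0 with ⟨hb1, hb2⟩ | ⟨i, s, yv, hi, hb1, hb2⟩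
    · rw [hb1, hb2]; rfl
    · rw [hb1, hb2]
      dsimp only
      obtain ⟨hk, hky, -⟩ := PySem.List.getElem_of_index?_eq_some hi
      have hit : i < t + 1 := by rw [hlen] at hk; exact hk
      have hyv : yv = pvIter i A := by rw [← hky]; exact hget i hit hk
      have hgood : pvGood yv (t - i) := by
        constructor
        · have := pvIter_add i (t - i) A
          rw [show i + (t - i) = t by omega, hg.1] at this
          rw [hyv, ← this]
        · intro k hkk
          have := pvIter_add i k A
          rw [hyv, ← this]
          exact hg.2 (i + k) (by omega)
      have h3 := pvTailLoop_some (t - i) pvFuel yv [yv] hgood (by omega) (by simp)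
      rw [h3]
      dsimp only
      have hplen : (([yv] ++ (List.range (t - i)).map (fun k => pvIter (k+1) yv)).length : Int)
          = ((t - i : Nat) : Int) + 1 := by simp
      simp only [hplen, hlen]
      have : ((t + 1 : Nat) : Int) - (((t - i : Nat) : Int) + 1) = (i : Int) := by omega
      rw [this]
      rfl

-- ===== VERDICT (by name: the statement is the Claim_ definition above) =====
theorem solve_spec : Claim_equal_solve := by
  intro A B _
  unfold Spec_solve
  exact solve_eq A B
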